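-- pv_equiv track=rewrite | github.com/MehrabAtaie/P3-CSP | advance.py | is_partial_valid
-- ===== SOURCE A (Python) =====
-- def is_partial_valid(assignment):
--     eq_str = ''.join([a for a in assignment if a is not None])
--     operators = '+-*/'
--     if not eq_str:
--         return True
--
--     # بیش از یک مساوی مجاز نیست
--     if eq_str.count('=') > 1:
--         return False
--
--     # نباید با عملگر یا مساوی شروع شود
--     if eq_str[0] in operators + '=':
--         return False
--
--     # دو عملگر یا دو مساوی یا عملگر و مساوی نباید کنار هم باشند
--     for i in range(1, len(eq_str)):
--         if (eq_str[i] in operators + '=' and eq_str[i-1] in operators + '='):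
--             return False
--
--     # اگر مساوی وجود دارد، نباید هر دو سمتش خالی باشد (اما مجاز است فقط یک سمت ناقص باشد)
--     if '=' in eq_str:
--         left, right = eq_str.split('=', 1)
--         if not left:
--             return False
--         # فقط اگر بعد مساوی شروع شد (یعنی سمت راست مساوی خالی باشد)، مسیر قطع شود.
--         # سمت راست می‌تواند ناقص باشد تا بعداً کامل شود.
--
--     return True
-- ===== SOURCE B (Python) =====
-- def is_partial_valid(assignment):
--     # Single pass, no joined string: stream the characters of the non-None
--     # parts, tracking whether the previous char was special and a running
--     # '=' count.
--     specials = set('+-*/=')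
--     prev_special = None  # None: no character seen yet
--     eqs = 0
--     for part in assignment:
--         if part is None:
--             continue
--         for c in part:
--             if c == '=':
--                 eqs += 1
--                 if eqs > 1:
--                     return False
--             if c in specials and (prev_special is None or prev_special):
--                 return False
--             prev_special = c in specials
--     return True
-- ===== Notes on version B (the rewrite author's own statement) =====
-- stated objective: alternative
-- what changed: Replaces the join-then-three-scans structure (count pass, start check, adjacency index loop, split check) by one streaming pass over the characters of the non-None parts with a previous-is-special flag and a running '=' counter; the dead left-of-'=' split check disappears.
import Mathlib
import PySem

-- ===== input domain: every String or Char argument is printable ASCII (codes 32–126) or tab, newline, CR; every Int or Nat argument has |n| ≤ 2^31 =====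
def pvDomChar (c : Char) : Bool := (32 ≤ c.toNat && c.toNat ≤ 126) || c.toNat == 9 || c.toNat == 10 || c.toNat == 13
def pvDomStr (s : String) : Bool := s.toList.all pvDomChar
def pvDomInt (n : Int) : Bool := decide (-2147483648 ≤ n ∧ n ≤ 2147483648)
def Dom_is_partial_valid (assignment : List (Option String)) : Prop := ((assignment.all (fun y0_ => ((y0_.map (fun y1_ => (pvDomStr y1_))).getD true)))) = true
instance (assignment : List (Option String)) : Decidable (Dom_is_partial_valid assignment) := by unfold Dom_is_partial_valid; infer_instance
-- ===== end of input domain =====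

-- B replaces A's join + three separate scans by one streaming pass with a
-- previous-is-special flag and a running '=' counter (objective: alternative).

-- ===== PORT A =====
-- c in operators + '='
def aSpecial (c : Char) : Bool := c ∈ ['+', '-', '*', '/', '=']

-- the adjacency loop: for i in range(1, len(eq_str)), carrying eq_str[i-1] as prev
def aLoop (prev : Char) : List Char → Bool
  | [] => true
  | c :: rest => if aSpecial c && aSpecial prev then false else aLoop c rest

-- the body of A after eq_str is built: the three checks plus the split check
def aCheck : List Char → Bool
  | [] => true                                   -- not eq_str: return True
  | c0 :: rest =>
    if (c0 :: rest).count '=' > 1 then false     -- eq_str.count('=') > 1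
    else if aSpecial c0 then false               -- eq_str[0] in operators + '='
    else if aLoop c0 rest = false then false     -- the adjacency loop
    else if '=' ∈ (c0 :: rest) then              -- split('=', 1); left empty?
      if ((c0 :: rest).takeWhile (· ≠ '=')).isEmpty then false else true
    else true

def is_partial_valid (assignment : List (Option String)) : Bool :=
  -- eq_str = ''.join([a for a in assignment if a is not None])
  aCheck ((assignment.filterMap id).flatMap String.toList)

-- ===== PORT B =====
def bSpecial (c : Char) : Bool := c ∈ ['+', '-', '*', '/', '=']

-- state: none = already returned False; some (prev_special, eqs)
def bStep (st : Option (Option Bool × Nat)) (c : Char) : Option (Option Bool × Nat) :=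
  match st with
  | none => none
  | some (prev, eqs) =>
    let eqs' := if c = '=' then eqs + 1 else eqs
    if c = '=' && eqs' > 1 then none
    else if bSpecial c && (prev.getD true) then none   -- prev is None or prev
    else some (some (bSpecial c), eqs')

def is_partial_valid_alt (assignment : List (Option String)) : Bool :=
  (assignment.foldl
    (fun st part =>
      match part with
      | none => st                               -- if part is None: continue
      | some p => p.toList.foldl bStep st)
    (some (none, 0))).isSome

-- ===== PRECONDITION & SPEC =====
def Spec_is_partial_valid (assignment : List (Option String)) (out : Bool) : Prop := out = is_partial_valid_alt assignment
instance (assignment : List (Option String)) (out : Bool) : Decidable (Spec_is_partial_valid assignment out) := by unfold Spec_is_partial_valid; infer_instance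

-- ===== CLAIM (what is proved, stated in full; the proofs are below) =====
def Claim_equal_is_partial_valid : Prop := ∀ (assignment : List (Option String)), Dom_is_partial_valid assignment → Spec_is_partial_valid assignment (is_partial_valid assignment)

-- ===== LEMMAS AND PROOFS =====

-- proof helper: adjacency check carrying only the previous-special flag
def aLoop_flag (pb : Bool) : List Char → Bool
  | [] => true
  | c :: t => if bSpecial c && pb then false else aLoop_flag (bSpecial c) t

theorem bStep_none (s : List Char) : s.foldl bStep none = none := by
  induction s with
  | nil => rfl
  | cons c t ih => simpa [bStep] using ih

-- B's nested fold equals the single fold over the flattened character list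
theorem alt_flat (assignment : List (Option String)) (st : Option (Option Bool × Nat)) :
    assignment.foldl
      (fun st part => match part with
        | none => st
        | some p => p.toList.foldl bStep st) st
    = ((assignment.filterMap id).flatMap String.toList).foldl bStep st := by
  induction assignment generalizing st with
  | nil => rfl
  | cons a rest ih =>
    cases a with
    | none => simpa using ih st
    | some p => simp [ih, List.foldl_append]

-- invariant of B's loop after the first character
theorem bLoop_char (s : List Char) (pb : Bool) (e : Nat) (he : e ≤ 1) :
    (s.foldl bStep (some (some pb, e))).isSome
      = (decide (e + s.count '=' ≤ 1) && (aLoop_flag pb s)) := by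
  induction s generalizing pb e with
  | nil => simp [aLoop_flag]; omega
  | cons c t ih =>
    by_cases hc : c = '='
    · subst hc
      by_cases hee : e + 1 > 1
      · have h1 : ¬ (e + (t.count '=' + 1) ≤ 1) := by omega
        simp [bStep, hee, h1, bStep_none]
      · have he0 : e = 0 := by omega
        subst he0
        cases pb with
        | true => simp [bStep, bSpecial, aLoop_flag, bStep_none]
        | false =>
          have step : bStep (some (some false, 0)) '=' = some (some true, 1) := by
            simp [bStep, bSpecial]
          rw [List.foldl_cons, step, ih true 1 (by omega)]
          have hd : decide (1 + t.count '=' ≤ 1)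
              = decide (0 + (t.count '=' + 1) ≤ 1) :=
            decide_eq_decide.mpr (by omega)
          simp only [aLoop_flag, bSpecial, List.count_cons, hd]
          simp
    · cases hb : bSpecial c with
      | true =>
        cases pb with
        | true => simp [bStep, hc, hb, aLoop_flag, bStep_none]
        | false =>
          have step : bStep (some (some false, e)) c = some (some true, e) := by
            simp [bStep, hc, hb]
          rw [List.foldl_cons, step, ih true e he]
          simp [aLoop_flag, hb, List.count_cons, hc]
      | false =>
        have step : bStep (some (some pb, e)) c = some (some false, e) := by
          simp [bStep, hc, hb]
        rw [List.foldl_cons, step, ih false e he]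
        simp [aLoop_flag, hb, List.count_cons, hc]

-- aLoop only depends on whether prev is special
theorem aLoop_eq_flag (prev : Char) (s : List Char) :
    aLoop prev s = aLoop_flag (aSpecial prev) s := by
  induction s generalizing prev with
  | nil => rfl
  | cons c t ih => simp [aLoop, aLoop_flag, ih, aSpecial, bSpecial, Bool.and_comm]

-- ===== VERDICT (by name: the statement is the Claim_ definition above) =====
theorem is_partial_valid_spec : Claim_equal_is_partial_valid := by
  intro assignment _
  unfold Spec_is_partial_valid is_partial_valid is_partial_valid_alt
  rw [alt_flat]
  cases hs : (assignment.filterMap id).flatMap String.toList with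
  | nil => rfl
  | cons c0 rest =>
    cases hb : bSpecial c0 with
    | true =>
      -- first character is special: both sides reject
      have hB : bStep (some (none, 0)) c0 = none := by
        by_cases hc : c0 = '='
        · subst hc; simp [bStep, bSpecial]
        · simp [bStep, hc, hb]
      rw [List.foldl_cons, hB, bStep_none]
      have hA : aSpecial c0 = true := hb
      simp [aCheck, hA]
    | false =>
      have hc0 : c0 ≠ '=' := by
        intro h; subst h; simp [bSpecial] at hb
      have hB : bStep (some (none, 0)) c0 = some (some false, 0) := by
        simp [bStep, hc0, hb]
      rw [List.foldl_cons, hB, bLoop_char rest false 0 (by omega)]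
      simp only [aCheck]
      have hA : aSpecial c0 = false := hb
      have hcnt : (c0 :: rest).count '=' = rest.count '=' := by
        simp [List.count_cons, hc0]
      have htw : ((c0 :: rest).takeWhile (· ≠ '=')).isEmpty = false := by
        simp [List.takeWhile, hc0]
      rw [aLoop_eq_flag c0 rest, hA]
      by_cases hcg : rest.count '=' > 1
      · have h1 : ¬ (0 + rest.count '=' ≤ 1) := by omega
        simp [hcnt, hcg, h1]
      · have h1 : 0 + rest.count '=' ≤ 1 := by omega
        cases hal : aLoop_flag false rest with
        | false => simp [hcnt, hcg, hal, h1]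
        | true => simp [hcnt, hcg, hal, h1, htw, hc0]; omega
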